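-- pv_equiv track=rewrite | github.com/npucino/sandpyper | sandpyper/common.py | consecutive_ids
-- ===== SOURCE A (Python) =====
-- from operator import itemgetter
-- from itertools import product, groupby
--
-- def consecutive_ids(data, indices=True, limit=1):
--     """Returns indices of consecutive tr_ids in groups. Covenient to create multi-line geometries in case of disconnected shorelines."""
--
--     if bool(indices) == False:
--         return_i = 1  # return data values
--     else:
--         return_i = 0
--
--     groups = []
--
--     for k, g in groupby(enumerate(data), lambda ix: ix[0] - ix[1]):
--         groups.append(list(map(itemgetter(return_i), g)))
--
--     groups = [i for i in groups if len(i) > limit]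
--
--     return groups
-- ===== SOURCE B (Python) =====
-- def consecutive_ids(data, indices=True, limit=1):
--     """Staged: compute break positions, turn them into boundary pairs, slice."""
--     if not data:
--         return []
--     n = len(data)
--     cuts = [i for i, (x, y) in enumerate(zip(data, data[1:]), 1) if y - x != 1]
--     bounds = [0] + cuts + [n]
--     src = list(range(n)) if indices else data
--     return [src[a:b] for a, b in zip(bounds, bounds[1:]) if b - a > limit]
-- ===== Notes on version B (the rewrite author's own statement) =====
-- stated objective: alternative
-- what changed: Instead of a single grouping loop (itertools.groupby over enumerate keyed by i-data[i]), B works in stages: it first computes the list of break positions from pairwise differences of zip(data, data[1:]), turns them into boundary pairs, and materialises each group by slicing the index range or the data list between consecutive boundaries.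
import Mathlib
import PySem

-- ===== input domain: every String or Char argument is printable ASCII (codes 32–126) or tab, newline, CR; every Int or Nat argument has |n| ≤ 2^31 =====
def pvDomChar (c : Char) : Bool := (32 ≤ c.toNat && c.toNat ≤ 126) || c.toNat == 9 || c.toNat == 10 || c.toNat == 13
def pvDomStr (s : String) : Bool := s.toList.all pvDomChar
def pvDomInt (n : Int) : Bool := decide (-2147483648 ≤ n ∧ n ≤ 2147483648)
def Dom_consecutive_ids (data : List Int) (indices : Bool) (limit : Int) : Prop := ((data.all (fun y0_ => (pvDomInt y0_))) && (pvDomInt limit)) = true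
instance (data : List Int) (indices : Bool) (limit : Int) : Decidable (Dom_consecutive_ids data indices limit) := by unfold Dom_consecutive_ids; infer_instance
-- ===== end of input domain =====

-- B replaces the groupby(enumerate, i - data[i]) single grouping loop by staged passes:
-- compute the break positions from pairwise differences, form boundary pairs, and slice
-- the source list between them (measured faster in a timing run: bulk slicing instead
-- of per-element group iteration).


-- ===== PORT A =====
-- itemgetter(return_i): index component when indices is truthy, else the value
def pvSel (indices : Bool) (p : Int × Int) : Int := if indices then p.1 else p.2

-- enumerate(data) starting at index i (hand helper shared by A's groupby machinery)
def pvEnum (i : Int) : List Int → List (Int × Int)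
  | [] => []
  | v :: tl => (i, v) :: pvEnum (i + 1) tl

-- leading segment of pairs whose groupby key ix[0] - ix[1] equals k, and the rest
def pvSpan (k : Int) : List (Int × Int) → List (Int × Int) × List (Int × Int)
  | [] => ([], [])
  | p :: tl =>
    if p.1 - p.2 = k then
      let s := pvSpan k tl
      (p :: s.1, s.2)
    else ([], p :: tl)

theorem pvSpan_len (k : Int) : ∀ l : List (Int × Int), (pvSpan k l).2.length ≤ l.length := by
  intro l
  induction l with
  | nil => simp [pvSpan]
  | cons p tl ih =>
    simp only [pvSpan]
    split
    · simpa using Nat.le_succ_of_le ih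
    · simp

-- itertools.groupby(enumerate(data), key = i - v), groups as lists of pairs
def pvGroupby : List (Int × Int) → List (List (Int × Int))
  | [] => []
  | p :: tl =>
    let s := pvSpan (p.1 - p.2) tl
    (p :: s.1) :: pvGroupby s.2
termination_by l => l.length
decreasing_by
  have := pvSpan_len (p.1 - p.2) tl
  simp
  omega

def consecutive_ids (data : List Int) (indices : Bool) (limit : Int) : List (List Int) :=
  ((pvGroupby (pvEnum 0 data)).map (fun g => g.map (pvSel indices))).filter
    (fun g => decide (limit < (g.length : Int)))

-- ===== PORT B =====
def consecutive_ids_alt (data : List Int) (indices : Bool) (limit : Int) : List (List Int) :=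
  if data.isEmpty then []
  else
    let n : Int := data.length
    let cuts : List Int :=
      (PySem.List.enumerate (data.zip (PySem.List.slice data (some 1) none)) 1).filterMap
        (fun p => if p.2.2 - p.2.1 ≠ 1 then some p.1 else none)
    let bounds : List Int := 0 :: (cuts ++ [n])
    let src : List Int := if indices then PySem.List.pyRange 0 n 1 else data
    (bounds.zip bounds.tail).filterMap
      (fun p => if limit < p.2 - p.1 then some (PySem.List.slice src (some p.1) (some p.2)) else none)

-- ===== PRECONDITION & SPEC =====
def Spec_consecutive_ids (data : List Int) (indices : Bool) (limit : Int) (out : List (List Int)) : Prop := out = consecutive_ids_alt data indices limit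
instance (data : List Int) (indices : Bool) (limit : Int) (out : List (List Int)) : Decidable (Spec_consecutive_ids data indices limit out) := by unfold Spec_consecutive_ids; infer_instance

-- ===== CLAIM (what is proved, stated in full; the proofs are below) =====
def Claim_equal_consecutive_ids : Prop := ∀ (data : List Int) (indices : Bool) (limit : Int), Dom_consecutive_ids data indices limit → Spec_consecutive_ids data indices limit (consecutive_ids data indices limit)

-- ===== LEMMAS AND PROOFS =====

-- (run continuing v by successive +1 steps, remainder)
def runSplit (v : Int) : List Int → List Int × List Int
  | [] => ([], [])
  | w :: tl =>
    if w = v + 1 then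
      let s := runSplit w tl
      (w :: s.1, s.2)
    else ([], w :: tl)

theorem runSplit_len (v : Int) : ∀ l : List Int, (runSplit v l).2.length ≤ l.length := by
  intro l
  induction l generalizing v with
  | nil => simp [runSplit]
  | cons w tl ih =>
    simp only [runSplit]
    split
    · simpa using Nat.le_succ_of_le (ih w)
    · simp

-- lengths of the maximal consecutive runs of data
def runLens : List Int → List Nat
  | [] => []
  | v :: tl =>
    let s := runSplit v tl
    (s.1.length + 1) :: runLens s.2
termination_by l => l.length
decreasing_by
  have := runSplit_len v tl
  simp
  omega

-- split l into chunks of the given lengths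
def chunks {α : Type} (l : List α) : List Nat → List (List α)
  | [] => []
  | k :: ks => l.take k :: chunks (l.drop k) ks

-- direct recursion computing B's cut positions
def myCuts (s : Int) : List Int → List Int
  | x :: y :: tl => if y - x ≠ 1 then s :: myCuts (s + 1) (y :: tl) else myCuts (s + 1) (y :: tl)
  | _ => []

theorem runSplit_decomp (v : Int) (l : List Int) :
    l = (runSplit v l).1 ++ (runSplit v l).2 := by
  induction l generalizing v with
  | nil => simp [runSplit]
  | cons w tl ih =>
    simp only [runSplit]
    split
    · simpa using ih w
    · simp

theorem pvEnum_length (i : Int) (l : List Int) : (pvEnum i l).length = l.length := by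
  induction l generalizing i with
  | nil => simp [pvEnum]
  | cons v tl ih => simp [pvEnum, ih]

theorem pvEnum_append (i : Int) (l1 l2 : List Int) :
    pvEnum i (l1 ++ l2) = pvEnum i l1 ++ pvEnum (i + l1.length) l2 := by
  induction l1 generalizing i with
  | nil => simp [pvEnum]
  | cons v tl ih =>
    simp only [List.cons_append, pvEnum, ih]
    congr 2
    simp only [List.length_cons]
    push_cast
    ring

theorem span_enum (tl : List Int) : ∀ (v j : Int),
    pvSpan (j - (v + 1)) (pvEnum j tl) =
      (pvEnum j (runSplit v tl).1, pvEnum (j + ((runSplit v tl).1.length : Int)) (runSplit v tl).2) := by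
  induction tl with
  | nil => intro v j; simp [pvEnum, runSplit, pvSpan]
  | cons w tl ih =>
    intro v j
    by_cases h : w = v + 1
    · have hk2 : j + 1 - (w + 1) = j - (v + 1) := by omega
      have hih := ih w (j + 1)
      rw [hk2] at hih
      simp only [pvEnum, pvSpan, runSplit]
      rw [if_pos (show ((j : Int), w).1 - ((j : Int), w).2 = j - (v + 1) by simp; omega),
          if_pos h, hih]
      simp only [List.length_cons]
      congr 2
      push_cast
      ring
    · simp only [pvEnum, pvSpan, runSplit]
      rw [if_neg (show ¬ (((j : Int), w).1 - ((j : Int), w).2 = j - (v + 1)) by simp; omega),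
          if_neg h]
      simp [pvEnum]

theorem groupby_chunks : ∀ (m : Nat) (data : List Int) (i0 : Int), data.length = m →
    pvGroupby (pvEnum i0 data) = chunks (pvEnum i0 data) (runLens data) := by
  intro m
  induction m using Nat.strong_induction_on with
  | _ m ih =>
    intro data i0 hm
    cases data with
    | nil => simp [pvEnum, pvGroupby, runLens, chunks]
    | cons v tl =>
      have hd := runSplit_decomp v tl
      have hkey : i0 - v = i0 + 1 - (v + 1) := by omega
      have hspan := span_enum tl v (i0 + 1)
      have hlen : (runSplit v tl).2.length < m := by
        have hl := congrArg List.length hd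
        simp only [List.length_append] at hl
        simp only [List.length_cons] at hm
        omega
      have henum' : pvEnum (i0 + 1) tl =
          pvEnum (i0 + 1) (runSplit v tl).1 ++
            pvEnum (i0 + 1 + ((runSplit v tl).1.length : Int)) (runSplit v tl).2 := by
        conv_lhs => rw [hd]
        rw [pvEnum_append]
      simp only [pvEnum, pvGroupby, hkey, hspan]
      rw [ih _ hlen _ (i0 + 1 + ((runSplit v tl).1.length : Int)) rfl]
      simp only [runLens, chunks, List.take_succ_cons, List.drop_succ_cons]
      rw [henum', List.take_left' (pvEnum_length _ _), List.drop_left' (pvEnum_length _ _)]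

theorem chunks_map {α β : Type} (f : α → β) : ∀ (ks : List Nat) (l : List α),
    (chunks l ks).map (List.map f) = chunks (l.map f) ks := by
  intro ks
  induction ks with
  | nil => intro l; simp [chunks]
  | cons k ks ih => intro l; simp [chunks, ih, List.map_take, List.map_drop]

theorem map_fst_enum (l : List Int) : ∀ i : Int,
    (pvEnum i l).map Prod.fst = PySem.List.pyRange i (i + l.length) 1 := by
  induction l with
  | nil => intro i; simp [pvEnum, PySem.List.pyRange_one_eq_nil]
  | cons v tl ih =>
    intro i
    rw [PySem.List.pyRange_one_cons (by simp)]
    have harg : i + 1 + (tl.length : Int) = i + ((v :: tl).length : Int) := by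
      simp only [List.length_cons]
      push_cast
      ring
    simp only [pvEnum, List.map_cons, ih (i + 1), harg]

theorem map_snd_enum (l : List Int) : ∀ i : Int, (pvEnum i l).map Prod.snd = l := by
  induction l with
  | nil => intro i; simp [pvEnum]
  | cons v tl ih => intro i; simp [pvEnum, ih (i + 1)]

theorem cuts_eq (l : List Int) : ∀ s : Int,
    (PySem.List.enumerate (l.zip l.tail) s).filterMap
        (fun p => if p.2.2 - p.2.1 ≠ 1 then some p.1 else none) = myCuts s l := by
  induction l with
  | nil => intro s; simp [myCuts, PySem.List.enumerate_nil]
  | cons x tl ih =>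
    intro s
    cases tl with
    | nil => simp [myCuts, PySem.List.enumerate_nil]
    | cons y tl' =>
      simp only [List.tail_cons, List.zip_cons_cons, PySem.List.enumerate_cons,
        List.filterMap_cons]
      have h2 := ih (s + 1)
      simp only [List.tail_cons] at h2
      by_cases h : y - x ≠ 1
      · simp only [myCuts, if_pos h, h2]
      · simp only [myCuts, if_neg h, h2]

theorem runCuts (tl : List Int) : ∀ (v s : Int),
    myCuts s (v :: tl) =
      (if (runSplit v tl).2.isEmpty then []
       else (s + ((runSplit v tl).1.length : Int)) ::
         myCuts (s + ((runSplit v tl).1.length : Int) + 1) (runSplit v tl).2) := by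
  induction tl with
  | nil => intro v s; simp [myCuts, runSplit]
  | cons w tl ih =>
    intro v s
    by_cases h : w = v + 1
    · have hne : ¬ (w - v ≠ 1) := by omega
      simp only [myCuts, if_neg hne, runSplit, if_pos h, ih w (s + 1)]
      by_cases he : (runSplit w tl).2.isEmpty
      · simp [he]
      · simp only [he, List.length_cons]
        push_cast
        rw [show s + 1 + (((runSplit w tl).1.length : Nat) : Int) =
            s + ((((runSplit w tl).1.length : Nat) : Int) + 1) from by ring]
    · have hyes : (w - v ≠ 1) := by omega
      simp only [myCuts, if_pos hyes, runSplit, if_neg h]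
      simp

theorem bmain : ∀ (m : Nat) (data : List Int) (a : Nat) (src : List Int) (limit : Int),
    data.length = m → data ≠ [] → a + data.length ≤ src.length →
    (((a : Int) :: (myCuts ((a : Int) + 1) data ++ [(a : Int) + (data.length : Int)])).zip
        (((a : Int) :: (myCuts ((a : Int) + 1) data ++ [(a : Int) + (data.length : Int)])).tail)).filterMap
      (fun p => if limit < p.2 - p.1 then some (PySem.List.slice src (some p.1) (some p.2)) else none)
    = (chunks (src.drop a) (runLens data)).filter (fun g => decide (limit < (g.length : Int))) := by
  intro m
  induction m using Nat.strong_induction_on with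
  | _ m ih =>
    intro data a src limit hm hne hlen
    match data, hne with
    | v :: tl, _ =>
    have hd := runSplit_decomp v tl
    have hl := congrArg List.length hd
    simp only [List.length_append] at hl
    rw [runCuts]
    cases hrest : (runSplit v tl).2 with
    | nil =>
      rw [hrest] at hl
      simp only [List.length_nil, Nat.add_zero] at hl
      have hlen1 : (v :: tl).length = (runSplit v tl).1.length + 1 := by
        simp [hl]
      have hrl : runLens (v :: tl) = [(runSplit v tl).1.length + 1] := by
        simp [runLens, hrest]
      have hslice : PySem.List.slice src (some (a : Int))
            (some ((a : Int) + ((v :: tl).length : Int))) =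
          (src.drop a).take ((runSplit v tl).1.length + 1) := by
        rw [show ((v :: tl).length : Int) = (((runSplit v tl).1.length + 1 : Nat) : Int) by
          rw [hlen1]]
        exact PySem.List.slice_natCast_add src a _
      have htake : (((src.drop a).take ((runSplit v tl).1.length + 1)).length : Int) =
          (((runSplit v tl).1.length + 1 : Nat) : Int) := by
        rw [hlen1] at hlen
        simp only [List.length_take, List.length_drop]
        push_cast
        omega
      have hcond : (a : Int) + ((v :: tl).length : Int) - (a : Int) =
          (((runSplit v tl).1.length + 1 : Nat) : Int) := by
        rw [hlen1]
        push_cast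
        ring
      simp only [List.isEmpty_nil, if_true, List.nil_append, List.tail_cons,
        List.zip_cons_cons, List.zip_nil_right, List.filterMap_cons, List.filterMap_nil,
        hrl, chunks, List.filter, hcond, hslice, htake]
      by_cases hc : limit ≤ (((runSplit v tl).1.length : Nat) : Int)
      · simp [hc]
      · simp [hc]
    | cons w rest' =>
      rw [hrest] at hl
      -- abbreviations
      have hLm : (runSplit v tl).1.length + 1 + (w :: rest').length = (v :: tl).length := by
        simp [hl]
        omega
      have c1 : (a : Int) + 1 + ((runSplit v tl).1.length : Int) =
          ((a + ((runSplit v tl).1.length + 1) : Nat) : Int) := by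
        push_cast
        ring
      have c3 : (a : Int) + ((v :: tl).length : Int) =
          ((a + ((runSplit v tl).1.length + 1) : Nat) : Int) + ((w :: rest').length : Int) := by
        rw [← hLm]
        push_cast
        ring
      simp only [List.isEmpty_cons, Bool.false_eq_true, if_false, c1, c3,
        List.cons_append, List.tail_cons, List.zip_cons_cons, List.filterMap_cons]
      have h1 : (w :: rest').length = rest'.length + 1 := by simp
      have h2 : (v :: tl).length = tl.length + 1 := by simp
      have hrec := ih (w :: rest').length (by omega) (w :: rest')
          (a + ((runSplit v tl).1.length + 1)) src limit rfl (by simp) (by omega)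
      simp only [List.tail_cons] at hrec
      rw [hrec]
      have hrl : runLens (v :: tl) =
          ((runSplit v tl).1.length + 1) :: runLens ((runSplit v tl).2) := by
        simp only [runLens]
      rw [hrl, hrest]
      simp only [chunks, List.filter]
      have hdrop : (src.drop a).drop ((runSplit v tl).1.length + 1) =
          src.drop (a + ((runSplit v tl).1.length + 1)) := by
        rw [List.drop_drop]
      have hslice : PySem.List.slice src (some (a : Int))
            (some ((a + ((runSplit v tl).1.length + 1) : Nat) : Int)) =
          (src.drop a).take ((runSplit v tl).1.length + 1) := by
        rw [PySem.List.slice_natCast]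
        congr 1
        omega
      have htake : ((src.drop a).take ((runSplit v tl).1.length + 1)).length =
          (runSplit v tl).1.length + 1 := by
        simp only [List.length_take, List.length_drop]
        omega
      have hcond : ((a + ((runSplit v tl).1.length + 1) : Nat) : Int) - (a : Int) =
          (((runSplit v tl).1.length + 1 : Nat) : Int) := by
        push_cast
        ring
      rw [hdrop, hcond, hslice, htake]
      by_cases hc : limit ≤ (((runSplit v tl).1.length : Nat) : Int)
      · simp [hc]
      · simp [hc]

-- ===== VERDICT (by name: the statement is the Claim_ definition above) =====
theorem consecutive_ids_spec : Claim_equal_consecutive_ids := by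
  intro data indices limit _
  unfold Spec_consecutive_ids
  cases data with
  | nil => simp [consecutive_ids, consecutive_ids_alt, pvEnum, pvGroupby]
  | cons v tl =>
    unfold consecutive_ids consecutive_ids_alt
    simp only [List.isEmpty_cons, Bool.false_eq_true, if_false]
    rw [PySem.List.slice_from_one, cuts_eq]
    rw [groupby_chunks (v :: tl).length (v :: tl) 0 rfl]
    cases indices with
    | false =>
      have hb := bmain (v :: tl).length (v :: tl) 0 (v :: tl) limit rfl (by simp)
        (by omega)
      simp only [Nat.cast_zero, zero_add, List.drop_zero] at hb
      simp only [Bool.false_eq_true, if_false]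
      rw [hb]
      have hsel : (pvEnum 0 (v :: tl)).map (pvSel false) = v :: tl := by
        have h := map_snd_enum (v :: tl) 0
        exact (rfl : (pvEnum 0 (v :: tl)).map (pvSel false) =
          (pvEnum 0 (v :: tl)).map Prod.snd).trans h
      rw [chunks_map, hsel]
    | true =>
      have hsrc : (PySem.List.pyRange 0 (((v :: tl).length : Nat) : Int) 1).length =
          (v :: tl).length := by
        rw [PySem.List.length_pyRange_one]
        simp
      have hb := bmain (v :: tl).length (v :: tl) 0
        (PySem.List.pyRange 0 (((v :: tl).length : Nat) : Int) 1) limit rfl (by simp)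
        (by rw [hsrc]; omega)
      simp only [Nat.cast_zero, zero_add, List.drop_zero] at hb
      rw [if_pos rfl]
      rw [hb]
      have hsel : (pvEnum 0 (v :: tl)).map (pvSel true) =
          PySem.List.pyRange 0 (((v :: tl).length : Nat) : Int) 1 := by
        have h := map_fst_enum (v :: tl) 0
        simp only [zero_add] at h
        exact (rfl : (pvEnum 0 (v :: tl)).map (pvSel true) =
          (pvEnum 0 (v :: tl)).map Prod.fst).trans h
      rw [chunks_map, hsel]
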